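-- pv_equiv track=rewrite | github.com/HenilMistry/DjangoLearning | 33_task.py | validateSpecial
-- ===== SOURCE A (Python) =====
-- import string
--
-- def validateSpecial(password):
--     specials = string.punctuation
--     valid = False
--     for character in password:
--         if character in specials:
--             valid = True
--             break
--     return valid
-- ===== SOURCE B (Python) =====
-- import string
--
-- def validateSpecial(password):
--     return bool(set(password) & set(string.punctuation))
-- ===== Notes on version B (the rewrite author's own statement) =====
-- stated objective: idiomatic
-- what changed: Replaces the explicit scan with a valid flag and early break by a set intersection of the password's characters with the punctuation set, tested for non-emptiness.
import Mathlib
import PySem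

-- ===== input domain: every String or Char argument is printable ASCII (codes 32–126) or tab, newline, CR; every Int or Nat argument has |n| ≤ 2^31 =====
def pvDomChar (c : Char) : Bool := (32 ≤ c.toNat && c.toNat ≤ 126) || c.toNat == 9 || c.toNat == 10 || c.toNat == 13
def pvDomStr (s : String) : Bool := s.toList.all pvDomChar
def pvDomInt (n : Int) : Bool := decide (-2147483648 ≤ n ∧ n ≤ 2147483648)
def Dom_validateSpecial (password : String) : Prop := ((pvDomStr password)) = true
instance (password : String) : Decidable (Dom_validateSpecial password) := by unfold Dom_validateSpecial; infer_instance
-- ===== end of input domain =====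

-- B replaces A's early-exit scan with a punctuation-set intersection test (idiomatic one-liner; O(1) set membership replaces the per-character substring scan).

-- ===== PORT A =====
-- string.punctuation
def pvPunct : String := "!\"#$%&'()*+,-./:;<=>?@[\\]^_`{|}~"

-- the for-loop with the 'valid' flag and break: once set, the loop exits, so it is
-- first-match recursion over the characters ('character in specials' on a 1-char
-- character is exactly char membership in the string's characters — exact here)
def validateSpecialGo (specials : List Char) : List Char → Bool
  | [] => false
  | c :: cs => if specials.contains c then true else validateSpecialGo specials cs

def validateSpecial (password : String) : Bool :=
  validateSpecialGo pvPunct.toList password.toList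

-- ===== PORT B =====
-- bool(set(password) & set(string.punctuation)): truthiness of a set = non-emptiness
def validateSpecial_alt (password : String) : Bool :=
  !(PySem.Set.inter (PySem.Set.ofList password.toList) (PySem.Set.ofList pvPunct.toList)).isEmpty

-- ===== PRECONDITION & SPEC =====
def Spec_validateSpecial (password : String) (out : Bool) : Prop := out = validateSpecial_alt password
instance (password : String) (out : Bool) : Decidable (Spec_validateSpecial password out) := by unfold Spec_validateSpecial; infer_instance

-- ===== CLAIM (what is proved, stated in full; the proofs are below) =====
def Claim_equal_validateSpecial : Prop := ∀ (password : String), Dom_validateSpecial password → Spec_validateSpecial password (validateSpecial password)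

-- ===== LEMMAS AND PROOFS =====
theorem go_eq_any (sp : List Char) : ∀ l : List Char,
    validateSpecialGo sp l = l.any (fun c => sp.contains c) := by
  intro l
  induction l with
  | nil => rfl
  | cons c cs ih =>
    by_cases h : sp.contains c <;> simp [validateSpecialGo, List.any_cons, ih, h]

theorem alt_eq_any (l sp : List Char) :
    (!(PySem.Set.inter (PySem.Set.ofList l) (PySem.Set.ofList sp)).isEmpty)
      = l.any (fun c => sp.contains c) := by
  rw [Bool.eq_iff_iff]
  simp [List.eq_nil_iff_forall_not_mem, PySem.Set.mem_inter, PySem.Set.mem_ofList,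
    List.any_eq_true, List.contains_iff_mem]

-- ===== VERDICT (by name: the statement is the Claim_ definition above) =====
theorem validateSpecial_spec : Claim_equal_validateSpecial := by
  intro password _
  unfold Spec_validateSpecial validateSpecial validateSpecial_alt
  rw [go_eq_any, alt_eq_any]
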